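-- pv_equiv track=rewrite | github.com/thisfren/desloppiflutter | desloppify/languages/rust/detectors/_shared.py | _preceding_comment_block
-- ===== SOURCE A (Python) =====
-- def _preceding_comment_block(prefix: str) -> str:
--     lines = prefix.splitlines()
--     collected: list[str] = []
--     for raw_line in reversed(lines):
--         stripped = raw_line.strip()
--         if not stripped:
--             if collected:
--                 break
--             continue
--         if stripped.startswith("//"):
--             collected.append(stripped)
--             continue
--         break
--     return "\n".join(reversed(collected))
-- ===== SOURCE B (Python) =====
-- def _preceding_comment_block(prefix: str) -> str:
--     current: list[str] = []
--     committed: list[str] = []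
--     for line in prefix.splitlines():
--         stripped = line.strip()
--         if stripped.startswith("//"):
--             current.append(stripped)
--         elif not stripped:
--             if current:
--                 committed = current
--                 current = []
--         else:
--             current = []
--             committed = []
--     if current:
--         committed = current
--     return "\n".join(committed)
-- ===== Notes on version B (the rewrite author's own statement) =====
-- stated objective: alternative
-- what changed: B scans the lines forward once maintaining the current contiguous comment run and the last run committed at a blank break, instead of A's backward scan with break/continue over reversed(lines) followed by a final reverse.
import Mathlib
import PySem

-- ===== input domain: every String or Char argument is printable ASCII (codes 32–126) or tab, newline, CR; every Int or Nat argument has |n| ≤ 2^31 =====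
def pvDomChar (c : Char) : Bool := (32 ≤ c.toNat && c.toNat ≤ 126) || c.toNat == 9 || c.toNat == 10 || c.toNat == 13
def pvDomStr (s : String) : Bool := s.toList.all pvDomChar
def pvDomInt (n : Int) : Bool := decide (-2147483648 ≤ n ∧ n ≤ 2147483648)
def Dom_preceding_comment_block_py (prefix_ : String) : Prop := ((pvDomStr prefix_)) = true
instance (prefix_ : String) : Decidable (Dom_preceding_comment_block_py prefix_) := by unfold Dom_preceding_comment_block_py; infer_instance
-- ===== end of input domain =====

-- B replaces A's backward break/continue scan over reversed(lines) by a forward one-pass current/committed run scan; objective: alternative decomposition.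

-- ===== PORT A =====
-- the for-loop over reversed(lines) with its break/continue, threading `collected`
def pcbGo : List String → List String → List String
  | [], collected => collected
  | raw_line :: rest, collected =>
    let stripped := PySem.Str.strip raw_line
    if stripped = "" then
      if collected ≠ [] then collected
      else pcbGo rest collected
    else if PySem.Str.startswith stripped "//" then
      pcbGo rest (collected ++ [stripped])
    else collected

def preceding_comment_block_py (prefix_ : String) : String :=
  let lines := PySem.Str.splitlines prefix_
  let collected := pcbGo lines.reverse []
  PySem.Str.join "\n" collected.reverse

-- ===== PORT B =====
-- B's loop body: state = (current, committed)
def pcbStep (st : List String × List String) (line : String) : List String × List String :=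
  let stripped := PySem.Str.strip line
  if PySem.Str.startswith stripped "//" then (st.1 ++ [stripped], st.2)
  else if stripped = "" then
    (if st.1 ≠ [] then ([], st.1) else st)
  else ([], [])


def preceding_comment_block_py_alt (prefix_ : String) : String :=
  let st := (PySem.Str.splitlines prefix_).foldl pcbStep ([], [])
  let committed := if st.1 ≠ [] then st.1 else st.2
  PySem.Str.join "\n" committed

-- ===== PRECONDITION & SPEC =====
def Spec_preceding_comment_block_py (prefix_ : String) (out : String) : Prop := out = preceding_comment_block_py_alt prefix_
instance (prefix_ : String) (out : String) : Decidable (Spec_preceding_comment_block_py prefix_ out) := by unfold Spec_preceding_comment_block_py; infer_instance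

-- ===== CLAIM (what is proved, stated in full; the proofs are below) =====
def Claim_equal_preceding_comment_block_py : Prop := ∀ (prefix_ : String), Dom_preceding_comment_block_py prefix_ → Spec_preceding_comment_block_py prefix_ (preceding_comment_block_py prefix_)

-- ===== LEMMAS AND PROOFS =====

theorem pcb_comment_ne_empty (s : String) (h : PySem.Str.startswith s "//" = true) : s ≠ "" := by
  intro he; subst he; exact absurd h (by decide)

theorem pcbGo_acc (rev : List String) (acc : List String) (h : acc ≠ []) :
    pcbGo rev acc
      = acc ++ (rev.takeWhile (fun r => PySem.Str.startswith (PySem.Str.strip r) "//")).map PySem.Str.strip := by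
  induction rev generalizing acc with
  | nil => simp [pcbGo]
  | cons r rest ih =>
    by_cases hc : PySem.Str.startswith (PySem.Str.strip r) "//" = true
    · have hne : PySem.Str.strip r ≠ "" := pcb_comment_ne_empty _ hc
      rw [show pcbGo (r :: rest) acc = pcbGo rest (acc ++ [PySem.Str.strip r]) from by
            simp only [pcbGo]; rw [if_neg hne, if_pos hc],
          ih (acc ++ [PySem.Str.strip r]) (by simp),
          List.takeWhile_cons_of_pos (p := fun r => PySem.Str.startswith (PySem.Str.strip r) "//") hc]
      simp
    · by_cases hb : PySem.Str.strip r = ""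
      · have hcf : ¬ PySem.Str.startswith (PySem.Str.strip r) "//" = true := hc
        rw [show pcbGo (r :: rest) acc = acc from by
              simp only [pcbGo]; rw [if_pos hb, if_pos h],
            List.takeWhile_cons_of_neg (p := fun r => PySem.Str.startswith (PySem.Str.strip r) "//") hcf]
        simp
      · rw [show pcbGo (r :: rest) acc = acc from by
              simp only [pcbGo]; rw [if_neg hb, if_neg hc],
            List.takeWhile_cons_of_neg (p := fun r => PySem.Str.startswith (PySem.Str.strip r) "//") hc]
        simp

theorem pcb_cur_inv (l : List String) :
    (l.foldl pcbStep ([], [])).1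
      = ((l.reverse.takeWhile (fun r => PySem.Str.startswith (PySem.Str.strip r) "//")).map PySem.Str.strip).reverse := by
  induction l using List.reverseRecOn with
  | nil => simp
  | append_singleton l x ih =>
    rw [List.foldl_append, List.foldl_cons, List.foldl_nil, List.reverse_append,
        List.reverse_singleton, List.singleton_append]
    by_cases hc : PySem.Str.startswith (PySem.Str.strip x) "//" = true
    · rw [show ∀ st, pcbStep st x = (st.1 ++ [PySem.Str.strip x], st.2) from fun st => by
            simp only [pcbStep]; rw [if_pos hc]]
      rw [List.takeWhile_cons_of_pos (p := fun r => PySem.Str.startswith (PySem.Str.strip r) "//") hc]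
      simp [ih]
    · by_cases hb : PySem.Str.strip x = ""
      · rw [show ∀ st, pcbStep st x = (if st.1 ≠ [] then ([], st.1) else st) from fun st => by
              simp only [pcbStep]; rw [if_neg hc, if_pos hb]]
        rw [List.takeWhile_cons_of_neg (p := fun r => PySem.Str.startswith (PySem.Str.strip r) "//") hc]
        split <;> simp_all
      · rw [show ∀ st, pcbStep st x = ([], []) from fun st => by
              simp only [pcbStep]; rw [if_neg hc, if_neg hb]]
        rw [List.takeWhile_cons_of_neg (p := fun r => PySem.Str.startswith (PySem.Str.strip r) "//") hc]
        simp

theorem pcb_main (l : List String) :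
    (pcbGo l.reverse []).reverse
      = (let st := l.foldl pcbStep ([], []); if st.1 ≠ [] then st.1 else st.2) := by
  induction l using List.reverseRecOn with
  | nil => simp [pcbGo]
  | append_singleton l x ih =>
    rw [List.reverse_append, List.reverse_singleton, List.singleton_append,
        List.foldl_append, List.foldl_cons, List.foldl_nil]
    by_cases hc : PySem.Str.startswith (PySem.Str.strip x) "//" = true
    · have hne : PySem.Str.strip x ≠ "" := pcb_comment_ne_empty _ hc
      rw [show pcbGo (x :: l.reverse) [] = pcbGo l.reverse [PySem.Str.strip x] from by
            simp only [pcbGo]; rw [if_neg hne, if_pos hc]; simp,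
          pcbGo_acc _ _ (by simp),
          show pcbStep (l.foldl pcbStep ([], [])) x
              = ((l.foldl pcbStep ([], [])).1 ++ [PySem.Str.strip x], (l.foldl pcbStep ([], [])).2) from by
            simp only [pcbStep]; rw [if_pos hc]]
      rw [pcb_cur_inv l]
      simp
    · by_cases hb : PySem.Str.strip x = ""
      · rw [show pcbGo (x :: l.reverse) [] = pcbGo l.reverse [] from by
              simp only [pcbGo]; rw [if_pos hb]; simp,
            ih,
            show pcbStep (l.foldl pcbStep ([], [])) x
                = (if (l.foldl pcbStep ([], [])).1 ≠ [] then ([], (l.foldl pcbStep ([], [])).1)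
                   else l.foldl pcbStep ([], [])) from by
              simp only [pcbStep]; rw [if_neg hc, if_pos hb]]
        split <;> simp_all
      · rw [show pcbGo (x :: l.reverse) [] = [] from by
              simp only [pcbGo]; rw [if_neg hb, if_neg hc],
            show pcbStep (l.foldl pcbStep ([], [])) x = ([], []) from by
              simp only [pcbStep]; rw [if_neg hc, if_neg hb]]
        simp

-- ===== VERDICT (by name: the statement is the Claim_ definition above) =====
theorem preceding_comment_block_py_spec : Claim_equal_preceding_comment_block_py := by
  intro prefix_ _
  unfold Spec_preceding_comment_block_py
  simp only [preceding_comment_block_py, preceding_comment_block_py_alt, pcb_main]
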